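-- pv_equiv track=rewrite | github.com/pailheres/uml-parser | src/uml-parser.py | state_diagram
-- ===== SOURCE A (Python) =====
-- def state_diagram(item):
--     result = {}
--     result['states'] = []
--     for d in item:
--         for key, value in d.items():
--             if key == 'state':
--                 result['states'].append(value)
--     return result
-- ===== SOURCE B (Python) =====
-- def state_diagram(item):
--     # Recursive decomposition: peel off the first dict, recurse on the rest,
--     # and prepend this dict's 'state' value (if any) to the recursively built list.
--     if not item:
--         return {'states': []}
--     head, tail = item[0], item[1:]
--     rest = state_diagram(tail)['states']
--     if 'state' in head:
--         rest = [head['state']] + rest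
--     return {'states': rest}
-- ===== Notes on version B (the rewrite author's own statement) =====
-- stated objective: alternative
-- what changed: Replaces A's iterative nested loops with in-place dict mutation by a structural recursion that builds the 'states' list back-to-front: recurse on the tail, then prepend the head dict's 'state' value if present, with no inner scan over (key, value) pairs.
import Mathlib
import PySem

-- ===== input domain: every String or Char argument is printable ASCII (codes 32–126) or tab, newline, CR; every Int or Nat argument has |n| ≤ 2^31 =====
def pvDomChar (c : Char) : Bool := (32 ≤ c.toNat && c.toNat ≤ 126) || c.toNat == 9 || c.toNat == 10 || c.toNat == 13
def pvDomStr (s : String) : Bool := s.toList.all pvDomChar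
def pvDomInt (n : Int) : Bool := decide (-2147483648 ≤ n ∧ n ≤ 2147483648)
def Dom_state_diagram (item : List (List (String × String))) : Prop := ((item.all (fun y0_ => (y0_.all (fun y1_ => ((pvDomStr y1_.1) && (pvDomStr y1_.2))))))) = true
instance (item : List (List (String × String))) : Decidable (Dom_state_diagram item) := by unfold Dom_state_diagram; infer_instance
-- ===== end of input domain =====

-- B replaces A's nested mutating loops by a structural recursion that builds the 'states'
-- list back-to-front, prepending each dict's 'state' value if present (objective: alternative).


-- ===== PORT A =====
-- result = {}; result['states'] = []; for d in item: for key, value in d.items():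
--   if key == 'state': result['states'].append(value);  return result
def state_diagram (item : List (List (String × String))) : List (String × List String) :=
  (item.foldl (fun r d =>
    d.foldl (fun r kv =>
      if kv.1 == "state" then r.modify "states" [] (fun l => l ++ [kv.2]) else r) r)
    ((PySem.Dict.empty : PySem.Dict String (List String)).insert "states" [])).items

-- ===== PORT B =====
-- if not item: return {'states': []}
-- head, tail = item[0], item[1:]; rest = state_diagram(tail)['states']
-- if 'state' in head: rest = [head['state']] + rest
-- return {'states': rest}
def state_diagram_alt : (item : List (List (String × String))) → List (String × List String)
  | [] => [("states", [])]
  | head :: tail =>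
    -- result['states'] on the recursive result: the key is always present, so getD is exact
    let rest := (PySem.Dict.mk (state_diagram_alt tail)).getD "states" []
    -- "'state' in head" then "head['state']": membership test + first-match lookup
    match (PySem.Dict.mk head).get? "state" with
    | some v => [("states", v :: rest)]
    | none => [("states", rest)]

-- ===== PRECONDITION & SPEC =====
-- Pre_ excludes inner association lists with duplicate keys: those correspond to no Python
-- dict (Python dicts cannot hold duplicate keys), so A's behaviour there is not defined by the source.
def Pre_state_diagram (item : List (List (String × String))) : Prop :=
  ∀ d ∈ item, (d.map Prod.fst).Nodup
instance (item : List (List (String × String))) : Decidable (Pre_state_diagram item) := by unfold Pre_state_diagram; infer_instance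
def pvWitness_state_diagram : (List (List (String × String))) :=
  [[("state", "S1"), ("x", "1")], [("y", "2")], [("state", "S2")]]
def Spec_state_diagram (item : List (List (String × String))) (out : List (String × List String)) : Prop := out = state_diagram_alt item
instance (item : List (List (String × String))) (out : List (String × List String)) : Decidable (Spec_state_diagram item out) := by unfold Spec_state_diagram; infer_instance

-- ===== CLAIM (what is proved, stated in full; the proofs are below) =====
def Claim_equal_state_diagram : Prop := ∀ (item : List (List (String × String))), Dom_state_diagram item → Pre_state_diagram item → Spec_state_diagram item (state_diagram item)

-- ===== LEMMAS AND PROOFS =====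

-- Characterisation of B: the singleton dict at "states" holding one lookup per dict, in order.
theorem sd_alt_eq (item : List (List (String × String))) :
    state_diagram_alt item
    = [("states", item.filterMap (fun d => (PySem.Dict.mk d).get? "state"))] := by
  induction item with
  | nil => simp [state_diagram_alt]
  | cons head tail ih =>
    rw [state_diagram_alt, ih]
    simp only [List.filterMap_cons]
    cases hg : (PySem.Dict.mk head).get? "state" <;>
      simp only [hg, PySem.Dict.getD, PySem.Dict.get?, PySem.Dict.mk] at * <;>
      simp [hg]

-- Inner loop of A: folding one dict's pairs over a dict holding only key "states" appends
-- exactly the values whose key is "state".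
theorem sd_inner (d : List (String × String)) (s : List String) :
    d.foldl (fun r kv =>
      if kv.1 == "state" then r.modify "states" [] (fun l => l ++ [kv.2]) else r)
      (PySem.Dict.mk [("states", s)])
    = PySem.Dict.mk [("states", s ++ (d.filter (fun kv => kv.1 == "state")).map Prod.snd)] := by
  induction d generalizing s with
  | nil => simp
  | cons kv rest ih =>
    by_cases h : kv.1 = "state"
    · have hstep : (PySem.Dict.mk [("states", s)]).modify "states" []
          (fun l => l ++ [kv.2]) = PySem.Dict.mk [("states", s ++ [kv.2])] := by
        simp [PySem.Dict.modify, PySem.Dict.getD, PySem.Dict.get?, PySem.Dict.insert,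
          PySem.Dict.contains]
      rw [List.foldl_cons]
      simp only [h, beq_self_eq_true, if_true]
      rw [hstep, ih (s ++ [kv.2])]
      simp [h]
    · simpa [List.foldl_cons, h] using ih s

-- With unique keys, collecting all values at key "state" is the same as the first-match lookup.
theorem sd_filter_eq_get (d : List (String × String)) (h : (d.map Prod.fst).Nodup) :
    (d.filter (fun kv => kv.1 == "state")).map Prod.snd
    = ((PySem.Dict.mk d).get? "state").toList := by
  induction d with
  | nil => simp [PySem.Dict.get?]
  | cons kv rest ih =>
    simp only [List.map_cons, List.nodup_cons] at h
    rw [PySem.Dict.get?_mk_cons]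
    by_cases hk : kv.1 = "state"
    · have hrest : rest.filter (fun kv => kv.1 == "state") = [] := by
        apply List.filter_eq_nil_iff.mpr
        intro p hp hpk
        rw [beq_iff_eq] at hpk
        exact h.1 (hk ▸ hpk ▸ List.mem_map_of_mem hp)
      simp [hk, hrest]
    · simp only [List.filter_cons, beq_iff_eq, if_neg hk]
      simp [ih h.2]

-- Outer loop of A with an accumulated "states" list.
theorem sd_outer (item : List (List (String × String))) (s : List String)
    (h : ∀ d ∈ item, (d.map Prod.fst).Nodup) :
    item.foldl (fun r d =>
      d.foldl (fun r kv =>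
        if kv.1 == "state" then r.modify "states" [] (fun l => l ++ [kv.2]) else r) r)
      (PySem.Dict.mk [("states", s)])
    = PySem.Dict.mk [("states", s ++ item.filterMap (fun d => (PySem.Dict.mk d).get? "state"))] := by
  induction item generalizing s with
  | nil => simp
  | cons d rest ih =>
    rw [List.foldl_cons, sd_inner,
        sd_filter_eq_get d (h d (List.mem_cons_self)),
        ih _ (fun d' hd' => h d' (List.mem_cons_of_mem _ hd'))]
    cases hg : (PySem.Dict.mk d).get? "state" <;>
      simp [hg]

-- ===== VERDICT (by name: the statement is the Claim_ definition above) =====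
theorem state_diagram_spec : Claim_equal_state_diagram := by
  intro item _ hpre
  show state_diagram item = state_diagram_alt item
  unfold state_diagram
  rw [sd_alt_eq]
  have h0 : (PySem.Dict.empty : PySem.Dict String (List String)).insert "states" []
      = PySem.Dict.mk [("states", [])] := by decide
  rw [h0, sd_outer item [] hpre]
  simp
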